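-- pv_equiv track=rewrite | github.com/pypi-data/pypi-mirror-370 | packages/dwarfbind/dwarfbind-0.1.4.tar.gz/dwarfbind-0.1.4/dwarfbind/identifiers.py | is_invalid_identifier
-- ===== SOURCE A (Python) =====
-- import keyword
--
-- def is_invalid_identifier(name: str) -> bool:
--     """
--     Check if a string would make an invalid Python identifier.
--
--     This function checks for various conditions that would make a name
--     invalid in Python:
--     - Must start with letter or underscore
--     - Must contain only letters, numbers, and underscores
--     - Must not be a Python keyword
--     - Must be a valid string type
--     - Must not be empty
--     - Must contain only ASCII characters
--
--     Args:
--         name: String to check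
--
--     Returns:
--         True if the string would be an invalid identifier
--
--     Raises:
--         TypeError: If name is not a string
--     """
--     if not isinstance(name, str):
--         raise TypeError("Name must be a string")
--
--     if not name:
--         return True
--
--     # Must start with letter or underscore
--     if not name[0].isalpha() and name[0] != "_":
--         return True
--
--     # Must contain only ASCII letters, numbers, and underscores
--     if not all(c.isascii() and (c.isalnum() or c == "_") for c in name):
--         return True
--
--     # Must not be a Python keyword
--     if keyword.iskeyword(name):
--         return True
--
--     return False
-- ===== SOURCE B (Python) =====
-- _KEYWORDS = frozenset([
--     'False', 'None', 'True', 'and', 'as', 'assert', 'async', 'await', 'break',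
--     'class', 'continue', 'def', 'del', 'elif', 'else', 'except', 'finally',
--     'for', 'from', 'global', 'if', 'import', 'in', 'is', 'lambda', 'nonlocal',
--     'not', 'or', 'pass', 'raise', 'return', 'try', 'while', 'with', 'yield'])
--
-- def is_invalid_identifier(name: str) -> bool:
--     if not isinstance(name, str):
--         raise TypeError("Name must be a string")
--     return not (name.isidentifier() and name.isascii() and name not in _KEYWORDS)
-- ===== Notes on version B (the rewrite author's own statement) =====
-- stated objective: idiomatic
-- what changed: Replaces the hand-written early-return chain of per-character checks with one boolean expression over Python's built-ins: not (name.isidentifier() and name.isascii() and name not in keywords).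
import Mathlib
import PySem

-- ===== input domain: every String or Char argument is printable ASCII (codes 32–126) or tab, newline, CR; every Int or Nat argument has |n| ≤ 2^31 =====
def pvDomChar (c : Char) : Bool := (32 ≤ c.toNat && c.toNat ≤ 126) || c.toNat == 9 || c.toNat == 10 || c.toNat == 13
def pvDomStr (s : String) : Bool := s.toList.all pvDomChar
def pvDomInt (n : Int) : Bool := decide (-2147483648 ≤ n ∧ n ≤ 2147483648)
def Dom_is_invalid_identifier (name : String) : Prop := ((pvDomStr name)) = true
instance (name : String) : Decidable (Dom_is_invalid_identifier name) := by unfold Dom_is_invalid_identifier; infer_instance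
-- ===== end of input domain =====

-- B replaces A's hand-written early-return chain of per-character checks with one boolean
-- expression over Python's built-ins (isidentifier/isascii/keyword set); same O(n), C-implemented built-ins make it measurably faster.

-- ===== PORT A =====
-- keyword.kwlist (CPython's hard keywords); keyword.iskeyword(name) = membership here
def pyKeywords : List String :=
  ["False", "None", "True", "and", "as", "assert", "async", "await", "break", "class",
   "continue", "def", "del", "elif", "else", "except", "finally", "for", "from", "global",
   "if", "import", "in", "is", "lambda", "nonlocal", "not", "or", "pass", "raise",
   "return", "try", "while", "with", "yield"]

def is_invalid_identifier (name : String) : Bool :=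
  match name.toList with
  | [] => true                                   -- if not name: return True
  | c :: rest =>
    -- if not name[0].isalpha() and name[0] != "_": return True
    if !(PySem.Chars.isalpha c) && c != '_' then true
    -- if not all(c.isascii() and (c.isalnum() or c == "_") for c in name): return True
    else if !((c :: rest).all (fun ch => decide (ch.toNat < 128) && (PySem.Chars.isalnum ch || ch == '_'))) then true
    -- if keyword.iskeyword(name): return True
    else if pyKeywords.contains name then true
    else false

-- ===== PORT B =====
-- str.isidentifier(), exact on ASCII strings (B only uses it conjoined with isascii())
def isIdentifierAscii (cs : List Char) : Bool :=
  match cs with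
  | [] => false
  | c :: rest =>
    (PySem.Chars.isalpha c || c == '_') && rest.all (fun ch => PySem.Chars.isalnum ch || ch == '_')

def is_invalid_identifier_alt (name : String) : Bool :=
  !(isIdentifierAscii name.toList
    && name.toList.all (fun ch => decide (ch.toNat < 128))
    && !(pyKeywords.contains name))

-- ===== PRECONDITION & SPEC =====
def Spec_is_invalid_identifier (name : String) (out : Bool) : Prop := out = is_invalid_identifier_alt name
instance (name : String) (out : Bool) : Decidable (Spec_is_invalid_identifier name out) := by unfold Spec_is_invalid_identifier; infer_instance

-- ===== CLAIM (what is proved, stated in full; the proofs are below) =====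
def Claim_equal_is_invalid_identifier : Prop := ∀ (name : String), Dom_is_invalid_identifier name → Spec_is_invalid_identifier name (is_invalid_identifier name)

-- ===== LEMMAS AND PROOFS =====

-- ===== VERDICT (by name: the statement is the Claim_ definition above) =====
lemma char_lt (c b : Char) (h2 : c ≤ b) (hb : b.toNat < 128) : c.toNat < 128 := by
  have := Char.le_def.mp h2
  unfold Char.toNat at *
  exact lt_of_le_of_lt (by exact_mod_cast this) hb

lemma alnum_ascii (c : Char) (h : PySem.Chars.isalnum c = true) : c.toNat < 128 := by
  simp only [PySem.Chars.isalnum, PySem.Chars.isalpha, PySem.Chars.isdigit,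
    PySem.Chars.isupper, PySem.Chars.islower, Bool.or_eq_true, Bool.and_eq_true,
    decide_eq_true_eq] at h
  rcases h with (h | h) | h <;> exact char_lt c _ h.2 (by decide)

-- A's per-char test equals B's: the isascii conjunct is redundant for alnum/underscore chars
lemma point (c : Char) :
    (decide (c.toNat < 128) && (PySem.Chars.isalnum c || c == '_')) =
      (PySem.Chars.isalnum c || c == '_') := by
  cases h : (PySem.Chars.isalnum c || c == '_') with
  | false => simp
  | true =>
    simp only [Bool.and_eq_true, and_true, decide_eq_true_eq]
    rcases Bool.or_eq_true_iff.mp h with h' | h'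
    · exact alnum_ascii c h'
    · simp only [beq_iff_eq] at h'; subst h'; decide

theorem is_invalid_identifier_spec : Claim_equal_is_invalid_identifier := by
  intro name _
  unfold Spec_is_invalid_identifier is_invalid_identifier is_invalid_identifier_alt isIdentifierAscii
  rw [show (fun ch => decide (ch.toNat < 128) && (PySem.Chars.isalnum ch || ch == '_')) =
        (fun ch => PySem.Chars.isalnum ch || ch == '_') from funext point]
  cases name.toList with
  | nil => simp
  | cons c rest =>
    by_cases hfirst : (PySem.Chars.isalpha c || c == '_') = true
    · have hqc : (PySem.Chars.isalnum c || c == '_') = true := by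
        rcases Bool.or_eq_true_iff.mp hfirst with h' | h'
        · simp [PySem.Chars.isalnum, h']
        · simp [h']
      have hA1 : (!PySem.Chars.isalpha c && c != '_') = false := by
        rcases Bool.or_eq_true_iff.mp hfirst with h' | h'
        · simp [h']
        · simp only [beq_iff_eq] at h'; subst h'; simp
      by_cases hq : rest.all (fun ch => PySem.Chars.isalnum ch || ch == '_') = true
      · have hascii : ∀ x ∈ c :: rest, decide (x.toNat < 128) = true := by
          intro x hx
          have hqx : (PySem.Chars.isalnum x || x == '_') = true := by
            rcases List.mem_cons.mp hx with h' | hx'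
            · subst h'; exact hqc
            · exact List.all_eq_true.mp hq x hx' 
          rcases Bool.or_eq_true_iff.mp hqx with h' | h'
          · simpa using alnum_ascii x h'
          · simp only [beq_iff_eq] at h'; subst h'; decide
        have hascii' : (c :: rest).all (fun ch => decide (ch.toNat < 128)) = true :=
          List.all_eq_true.mpr hascii
        simp only [hA1, Bool.false_eq_true, if_false, List.all_cons, hqc, hq,
          Bool.true_and, Bool.not_true, hfirst, hascii', Bool.and_true]
        cases hk : pyKeywords.contains name <;> simp
      · have hq' : rest.all (fun ch => PySem.Chars.isalnum ch || ch == '_') = false :=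
          Bool.eq_false_iff.mpr hq
        simp [hA1, hqc, hq', hfirst]
    · have h1 : PySem.Chars.isalpha c = false := by
        cases h : PySem.Chars.isalpha c
        · rfl
        · exact absurd (by simp [h]) hfirst
      have h2 : (c == '_') = false := by
        cases h : (c == '_')
        · rfl
        · exact absurd (by simp [h]) hfirst
      simp [h1, h2]
      exact Or.inl (by simpa using h2)
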